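-- pv_equiv track=rewrite | github.com/aysieelf/Alpha63 | Week_2/2_Git/dict_functions.py | aggregate_sum
-- ===== SOURCE A (Python) =====
-- def aggregate_sum(data):
--     """
--     Aggregates a list of 2-tuples into a dictionary.
--     The sum of values for each unique key is aggregated.
--
--     Parameters:
--         data (list) - The list of 2-tuples
--
--     Returns:
--         (dict) - The aggregated dictionary
--     """
--     aggregated_dict = {}
--
--     for key, value in data:
--         if key in aggregated_dict:
--             aggregated_dict[key] += value
--         else:
--             aggregated_dict[key] = value
--
--     return aggregated_dict
-- ===== SOURCE B (Python) =====
-- def aggregate_sum(data):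
--     groups = {}
--     for key, value in data:
--         groups.setdefault(key, []).append(value)
--     result = {}
--     for key, values in groups.items():
--         acc = values[0]
--         for v in values[1:]:
--             acc += v
--         result[key] = acc
--     return result
-- ===== Notes on version B (the rewrite author's own statement) =====
-- stated objective: alternative
-- what changed: B first groups values per key into lists (one pass with setdefault), then reduces each group to its sum in a second pass, instead of A's single pass that accumulates sums directly in the dict.
import Mathlib
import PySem

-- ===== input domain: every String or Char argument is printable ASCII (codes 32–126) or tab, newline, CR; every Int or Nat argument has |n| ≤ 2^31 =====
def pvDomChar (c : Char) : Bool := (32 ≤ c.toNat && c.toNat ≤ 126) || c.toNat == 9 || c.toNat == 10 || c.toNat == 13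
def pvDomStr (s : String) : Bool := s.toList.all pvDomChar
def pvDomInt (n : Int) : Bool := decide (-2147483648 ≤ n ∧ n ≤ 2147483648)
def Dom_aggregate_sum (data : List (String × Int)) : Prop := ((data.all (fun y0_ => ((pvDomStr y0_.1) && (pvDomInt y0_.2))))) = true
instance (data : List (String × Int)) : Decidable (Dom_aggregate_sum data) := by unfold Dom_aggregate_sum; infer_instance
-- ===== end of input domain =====

-- B groups the values per key into lists first, then reduces each group; same cost, different decomposition.

-- ===== PORT A =====
-- for key, value in data: if key in d: d[key] += value else: d[key] = value
def aggregate_sum (data : List (String × Int)) : List (String × Int) :=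
  (data.foldl
    (fun d p =>
      if d.contains p.1 then d.insert p.1 (d.getD p.1 0 + p.2)
      else d.insert p.1 p.2)
    PySem.Dict.empty).items

-- ===== PORT B =====
-- acc = values[0]; for v in values[1:]: acc += v   (groups' lists are never empty; [] branch unreachable)
def pvReduce (vs : List Int) : Int :=
  match vs with
  | [] => 0
  | h :: t => t.foldl (· + ·) h

def aggregate_sum_alt (data : List (String × Int)) : List (String × Int) :=
  let groups := data.foldl (fun d p => d.modify p.1 [] (· ++ [p.2])) PySem.Dict.empty
  (groups.items.foldl (fun r p => r.insert p.1 (pvReduce p.2)) PySem.Dict.empty).items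

-- ===== PRECONDITION & SPEC =====
def Spec_aggregate_sum (data : List (String × Int)) (out : List (String × Int)) : Prop := out = aggregate_sum_alt data
instance (data : List (String × Int)) (out : List (String × Int)) : Decidable (Spec_aggregate_sum data out) := by unfold Spec_aggregate_sum; infer_instance

-- ===== CLAIM (what is proved, stated in full; the proofs are below) =====
def Claim_equal_aggregate_sum : Prop := ∀ (data : List (String × Int)), Dom_aggregate_sum data → Spec_aggregate_sum data (aggregate_sum data)

-- ===== LEMMAS AND PROOFS =====

theorem foldl_add_int (t : List Int) (h : Int) : t.foldl (· + ·) h = h + t.sum := by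
  induction t generalizing h with
  | nil => simp
  | cons a t ih => simp [ih]; ring

theorem pvReduce_eq_sum (vs : List Int) : pvReduce vs = vs.sum := by
  cases vs with
  | nil => simp [pvReduce]
  | cons h t => simp [pvReduce, foldl_add_int]

-- A's branch collapses to a single modify
theorem stepA_eq (d : PySem.Dict String Int) (p : String × Int) :
    (if d.contains p.1 then d.insert p.1 (d.getD p.1 0 + p.2) else d.insert p.1 p.2)
      = d.modify p.1 0 (· + p.2) := by
  by_cases h : d.contains p.1
  · simp [h, PySem.Dict.modify]
  · have h0 : d.getD p.1 (0 : Int) = 0 :=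
      PySem.Dict.getD_of_not_contains d 0 (by simpa using h)
    simp [h, PySem.Dict.modify, h0]

theorem getD_foldl_modify_add (l : List (String × Int)) (d : PySem.Dict String Int) (k : String) :
    (l.foldl (fun d p => d.modify p.1 0 (· + p.2)) d).getD k 0
      = d.getD k 0 + ((l.filter (fun p => p.1 == k)).map (·.2)).sum := by
  induction l generalizing d with
  | nil => simp
  | cons p t ih =>
    simp only [List.foldl_cons, ih, List.filter_cons]
    by_cases h : p.1 = k
    · subst h
      simp [PySem.Dict.getD_modify_self]
      ring
    · have hb : (p.1 == k) = false := by simpa using h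
      rw [PySem.Dict.getD_modify, if_neg (fun hk => h hk.symm)]
      simp [hb]

theorem aggregate_sum_spec : Claim_equal_aggregate_sum := by
  intro data _
  unfold Spec_aggregate_sum aggregate_sum aggregate_sum_alt
  -- rewrite A's loop body to a modify loop
  have hA : (data.foldl
      (fun d p =>
        if d.contains p.1 then d.insert p.1 (d.getD p.1 0 + p.2)
        else d.insert p.1 p.2) PySem.Dict.empty)
      = data.foldl (fun d p => d.modify p.1 0 (· + p.2)) PySem.Dict.empty := by
    apply PySem.List.foldl_congr_mem
    intro acc x _
    exact stepA_eq acc x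
  rw [hA]
  set dA := data.foldl (fun d p => d.modify p.1 0 (· + p.2)) PySem.Dict.empty with hdA
  set dG := data.foldl (fun d p => d.modify p.1 [] (· ++ [p.2])) PySem.Dict.empty with hdG
  have hndA : dA.keys.Nodup := by
    rw [hdA]
    exact PySem.Dict.nodup_keys_foldl_modify_key data (·.1) 0 (fun d p => (· + p.2)) _
      PySem.Dict.nodup_keys_empty
  have hndG : dG.keys.Nodup := by
    rw [hdG]
    exact PySem.Dict.nodup_keys_foldl_modify_key data (·.1) [] (fun d p => (· ++ [p.2])) _
      PySem.Dict.nodup_keys_empty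
  have hkeys : dA.keys = dG.keys := by
    have h1 := PySem.Dict.keys_foldl_modify_key (l := data) (key := fun p => p.1)
      (d0 := (0 : Int)) (f := fun _ p => (· + p.2)) (d := (PySem.Dict.empty : PySem.Dict String Int))
    have h2 := PySem.Dict.keys_foldl_modify_key (l := data) (key := fun p => p.1)
      (d0 := ([] : List Int)) (f := fun _ p => (· ++ [p.2]))
      (d := (PySem.Dict.empty : PySem.Dict String (List Int)))
    exact h1.trans h2.symm
  have hval : ∀ k, dA.getD k 0 = pvReduce (dG.getD k []) := by
    intro k
    rw [hdA, hdG, getD_foldl_modify_add,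
      PySem.Dict.getD_foldl_modify_append, pvReduce_eq_sum]
    simp
  -- the second loop of B over groups.items inserts fresh distinct keys, so it is a map
  have hitemsB : (dG.items.foldl (fun r p => r.insert p.1 (pvReduce p.2)) PySem.Dict.empty).items
      = dG.items.map (fun p => (p.1, pvReduce p.2)) := by
    have := PySem.Dict.items_foldl_insert_fresh (l := dG.items) (d := PySem.Dict.empty)
      (k := (·.1)) (v := fun p => pvReduce p.2) (by intro a _; simp) (by simpa using hndG)
    simpa using this
  rw [hitemsB,
    PySem.Dict.items_eq_map_keys dA hndA 0,
    PySem.Dict.items_eq_map_keys dG hndG [],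
    List.map_map, hkeys]
  exact List.map_congr_left (fun k _ => by simp [hval k])
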